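-- pv_equiv track=rewrite | github.com/Owen-Huggins/CS-Projects | CS 1301/HW03.py | iceCream
-- ===== SOURCE A (Python) =====
-- def iceCream(flavor, vowels):
--     pass
--     new_flavor = flavor.lower()
--     num = 0
--     for letter in new_flavor:
--         if letter in "aeiou":
--             num += 1
--     str(vowels)
--     if num > vowels:
--         vowel = str(vowels)
--         return("Yes, " + new_flavor + " ice cream has more than " + vowel + " vowels!")
--     else:
--         vowel = str(vowels)
--         return("No, " + new_flavor + " ice cream doesn't have more than " + vowel + " vowels!")
-- ===== SOURCE B (Python) =====
-- def iceCream(flavor, vowels):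
--     new_flavor = flavor.lower()
--     num = sum(new_flavor.count(v) for v in "aeiou")
--     if num > vowels:
--         head, middle = "Yes, ", " ice cream has more than "
--     else:
--         head, middle = "No, ", " ice cream doesn't have more than "
--     return head + new_flavor + middle + str(vowels) + " vowels!"
-- ===== Notes on version B (the rewrite author's own statement) =====
-- stated objective: alternative
-- what changed: Replaces A's single per-character membership-testing accumulator loop with a sum of str.count over the five vowels (five whole-string scans), and assembles the message once from branch-selected head/middle fragments instead of two full return expressions.
import Mathlib
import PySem

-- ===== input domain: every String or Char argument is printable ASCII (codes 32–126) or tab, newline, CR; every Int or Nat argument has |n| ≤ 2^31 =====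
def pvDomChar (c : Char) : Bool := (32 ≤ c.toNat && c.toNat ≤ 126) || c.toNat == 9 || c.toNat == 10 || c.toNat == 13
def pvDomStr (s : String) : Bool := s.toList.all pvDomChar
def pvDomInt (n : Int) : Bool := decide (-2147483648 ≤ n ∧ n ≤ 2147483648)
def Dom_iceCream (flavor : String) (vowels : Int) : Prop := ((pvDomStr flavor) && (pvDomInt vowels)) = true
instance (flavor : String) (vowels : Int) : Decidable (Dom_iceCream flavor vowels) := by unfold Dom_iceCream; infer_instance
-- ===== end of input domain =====

-- B counts vowels as a sum of per-vowel str.count scans instead of A's per-character membership loop, and builds the message from branch-selected fragments (alternative decomposition; same cost).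


-- ===== PORT A =====
def iceCream (flavor : String) (vowels : Int) : String :=
  let new_flavor := PySem.Str.lower flavor
  let num : Int := new_flavor.toList.foldl
    (fun acc letter => if ("aeiou".toList).contains letter then acc + 1 else acc) 0
  if num > vowels then
    "Yes, " ++ new_flavor ++ " ice cream has more than " ++ PySem.Int.toStr vowels ++ " vowels!"
  else
    "No, " ++ new_flavor ++ " ice cream doesn't have more than " ++ PySem.Int.toStr vowels ++ " vowels!"

-- ===== PORT B =====
def iceCream_alt (flavor : String) (vowels : Int) : String :=
  let new_flavor := PySem.Str.lower flavor
  let num : Int := (("aeiou".toList).map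
    (fun v => (PySem.Str.count new_flavor (String.ofList [v]) : Int))).sum
  let parts :=
    if num > vowels then ("Yes, ", " ice cream has more than ")
    else ("No, ", " ice cream doesn't have more than ")
  parts.1 ++ new_flavor ++ parts.2 ++ PySem.Int.toStr vowels ++ " vowels!"

-- ===== PRECONDITION & SPEC =====
def Spec_iceCream (flavor : String) (vowels : Int) (out : String) : Prop := out = iceCream_alt flavor vowels
instance (flavor : String) (vowels : Int) (out : String) : Decidable (Spec_iceCream flavor vowels out) := by unfold Spec_iceCream; infer_instance

-- ===== CLAIM (what is proved, stated in full; the proofs are below) =====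
def Claim_equal_iceCream : Prop := ∀ (flavor : String) (vowels : Int), Dom_iceCream flavor vowels → Spec_iceCream flavor vowels (iceCream flavor vowels)

-- ===== LEMMAS AND PROOFS =====

-- single-char substring count is character count
theorem go_count (v : Char) (cs : List Char) :
    ∀ acc, PySem.Chars.count.go [v] cs.length cs acc = acc + cs.count v := by
  induction cs with
  | nil => intro acc; simp [PySem.Chars.count.go]
  | cons c cs ih =>
    intro acc
    rw [List.length_cons, PySem.Chars.count.go]
    simp only [List.isPrefixOf]
    by_cases h : c = v
    · simp [h, ih]; omega
    · simp [Ne.symm h, h, ih]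

theorem count_singleton (cs : List Char) (v : Char) :
    PySem.Chars.count cs [v] = cs.count v := by
  simp [PySem.Chars.count, go_count]

-- the membership count equals the sum of the five per-vowel counts
theorem countP_vowels (cs : List Char) :
    List.countP (['a','e','i','o','u'].contains) cs
      = cs.count 'a' + cs.count 'e' + cs.count 'i' + cs.count 'o' + cs.count 'u' := by
  induction cs with
  | nil => simp
  | cons c cs ih =>
    simp only [List.countP_cons, List.count_cons, ih]
    by_cases ha : c = 'a' <;> by_cases he : c = 'e' <;> by_cases hi : c = 'i' <;>
      by_cases ho : c = 'o' <;> by_cases hu : c = 'u' <;>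
      simp_all <;> omega

theorem num_eq (cs : List Char) :
    cs.foldl (fun acc letter => if ("aeiou".toList).contains letter then acc + 1 else acc) (0 : Int)
      = (("aeiou".toList).map (fun v => (PySem.Chars.count cs [v] : Int))).sum := by
  rw [PySem.List.foldl_if_add_one]
  simp [count_singleton]
  rw [countP_vowels]
  push_cast
  ring

-- ===== VERDICT (by name: the statement is the Claim_ definition above) =====
theorem iceCream_spec : Claim_equal_iceCream := by
  intro flavor vowels _
  unfold Spec_iceCream iceCream iceCream_alt
  simp only [PySem.Str.count_eq, String.toList_ofList, num_eq]
  split_ifs <;> rfl
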